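-- pv_equiv track=rewrite | github.com/AhriFoxSnek/ASnakeCompatibilityTest | rosettaCodes/Beriekamp-Massey algorithm.py | calculate_term
-- ===== SOURCE A (Python) =====
-- MOD = 2
--
-- def calculate_term(m, coef, h):
--     k = len(coef)
--     if m < len(h):
--         return (h[m] + MOD) % MOD
--     if k == 0:
--         return 0
--     p_coeffs = [0] * (k + 1)
--     p_coeffs[0] = (MOD - 1) % MOD
--     for i in range(k):
--         p_coeffs[i + 1] = coef[i]
--     def poly_mul(a, b, degree_k, p_poly):
--         res = [0] * (2 * degree_k)
--         for i in range(degree_k):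
--             if a[i] == 0: continue
--             for j in range(degree_k):
--                 res[i + j] = (res[i + j] + a[i] * b[j]) % MOD
--         for i in range(2 * degree_k - 1, degree_k - 1, -1):
--             if res[i] == 0: continue
--             term = res[i]
--             res[i] = 0
--             for j in range(degree_k + 1):
--                 idx = i - j
--                 if idx >= 0:
--                     res[idx] = (res[idx] + term * p_poly[j]) % MOD
--         return res[:degree_k]
--     f = [0] * k
--     g = [0] * k
--     f[0] = 1
--     if k == 1:
--         if k == 1:
--             g[0] = p_coeffs[1]
--         else:
--             g[1] = 1
--     else:
--         g[1] = 1
--     power = m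
--     while power > 0:
--         if power & 1:
--             f = poly_mul(f, g, k, p_coeffs)
--         g = poly_mul(g, g, k, p_coeffs)
--         power >>= 1
--     final_ans = 0
--     for i in range(k):
--         if i + 1 < len(h):
--             final_ans = (final_ans + h[i + 1] * f[i]) % MOD
--     return (final_ans + MOD) % MOD
-- ===== SOURCE B (Python) =====
-- MOD = 2
--
-- def calculate_term(m, coef, h):
--     if m < len(h):
--         return (h[m] + MOD) % MOD
--     k = len(coef)
--     if k == 0:
--         return 0
--     c = [x % MOD for x in coef]
--     seed = [h[i + 1] % MOD if i + 1 < len(h) else 0 for i in range(k)]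
--     # companion matrix of the recurrence: row i shifts the window, last row applies the coefficients
--     mat = [[1 if j == i + 1 else 0 for j in range(k)] for i in range(k - 1)]
--     mat.append([c[k - 1 - j] for j in range(k)])
--
--     def mat_mul(x, y):
--         return [[sum(x[i][l] * y[l][j] for l in range(k)) % MOD for j in range(k)]
--                 for i in range(k)]
--
--     res = [[1 if i == j else 0 for j in range(k)] for i in range(k)]
--     e = m
--     while e > 0:
--         if e % 2 == 1:
--             res = mat_mul(res, mat)
--         mat = mat_mul(mat, mat)
--         e //= 2
--     return sum(res[0][j] * seed[j] for j in range(k)) % MOD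
-- ===== Notes on version B (the rewrite author's own statement) =====
-- stated objective: alternative
-- what changed: A computes the m-th term by Kitamasa-style polynomial modular exponentiation (hand-written poly_mul with in-place reduction by the characteristic polynomial); B instead raises the k x k companion matrix of the recurrence to the m-th power by squaring over Z/2 and applies the seed window at the end.
import Mathlib
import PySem

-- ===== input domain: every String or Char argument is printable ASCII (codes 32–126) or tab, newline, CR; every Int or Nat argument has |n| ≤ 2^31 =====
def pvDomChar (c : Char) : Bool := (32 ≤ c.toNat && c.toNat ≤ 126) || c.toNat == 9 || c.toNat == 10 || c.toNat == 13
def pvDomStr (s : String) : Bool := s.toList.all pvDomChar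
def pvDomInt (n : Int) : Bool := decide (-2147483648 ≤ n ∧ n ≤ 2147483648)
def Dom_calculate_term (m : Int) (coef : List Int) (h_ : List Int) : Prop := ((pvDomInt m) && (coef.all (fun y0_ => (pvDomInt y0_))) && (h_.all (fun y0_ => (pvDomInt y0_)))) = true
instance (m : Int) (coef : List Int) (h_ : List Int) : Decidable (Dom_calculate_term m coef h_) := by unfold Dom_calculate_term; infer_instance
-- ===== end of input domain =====

-- B replaces A's Kitamasa-style polynomial modular exponentiation by companion-matrix
-- exponentiation by squaring over Z/2 (alternative algorithm, same return value).

-- ===== PORT A =====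
def pvPolyMul (a b : List Int) (k : Nat) (p : List Int) : List Int :=
  let res := (List.range k).foldl (fun res i =>
      if a.getD i 0 == 0 then res
      else (List.range k).foldl (fun res j =>
        res.set (i+j) (PySem.Int.mod (res.getD (i+j) 0 + a.getD i 0 * b.getD j 0) 2)) res)
    (List.replicate (2*k) (0:Int))
  let res := ((List.range k).map (fun t => 2*k-1-t)).foldl (fun (res : List Int) (i : Nat) =>
      if res.getD i 0 == 0 then res
      else
        let term := res.getD i 0
        let res := res.set i 0
        (List.range (k+1)).foldl (fun (res : List Int) (j : Nat) =>
          if (0:Int) ≤ (i:Int) - (j:Int) then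
            res.set (i-j) (PySem.Int.mod (res.getD (i-j) 0 + term * p.getD j 0) 2)
          else res) res) res
  res.take k

def pvLoopA (k : Nat) (p : List Int) (f g : List Int) (power : Int) : List Int :=
  if _h : 0 < power then
    pvLoopA k p (if PySem.Int.band power 1 == 1 then pvPolyMul f g k p else f)
      (pvPolyMul g g k p) (power >>> (1:Nat))
  else f
termination_by power.toNat
decreasing_by
  simp only [Int.shiftRight_eq_div_pow, pow_one]
  omega

def calculate_term (m : Int) (coef : List Int) (h_ : List Int) : Int :=
  let k := coef.length
  if m < (h_.length : Int) then
    PySem.Int.mod ((PySem.List.pyGet? h_ m).getD 0 + 2) 2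
  else if k == 0 then 0
  else
    let p := (List.range k).foldl (fun p i => p.set (i+1) (coef.getD i 0))
               ((List.replicate (k+1) (0:Int)).set 0 (PySem.Int.mod (2-1) 2))
    let f := (List.replicate k (0:Int)).set 0 1
    let g := if k == 1 then (List.replicate k (0:Int)).set 0 (p.getD 1 0)
             else (List.replicate k (0:Int)).set 1 1
    let f := pvLoopA k p f g m
    let ans := (List.range k).foldl (fun (acc : Int) (i : Nat) =>
        if ((i:Int)+1) < (h_.length:Int) then PySem.Int.mod (acc + h_.getD (i+1) 0 * f.getD i 0) 2 else acc) 0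
    PySem.Int.mod (ans + 2) 2

-- ===== PORT B =====
def pvMatMul (k : Nat) (x y : List (List Int)) : List (List Int) :=
  (List.range k).map (fun i => (List.range k).map (fun j =>
    PySem.Int.mod (((List.range k).map (fun l =>
      ((x.getD i []).getD l 0) * ((y.getD l []).getD j 0))).sum) 2))

def pvLoopB (k : Nat) (res mat : List (List Int)) (e : Int) : List (List Int) :=
  if 0 < e then
    pvLoopB k (if PySem.Int.mod e 2 == 1 then pvMatMul k res mat else res)
      (pvMatMul k mat mat) (PySem.Int.floordiv e 2)
  else res
termination_by e.toNat
decreasing_by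
  rw [PySem.Int.floordiv_eq_ediv_of_pos (by norm_num)]
  omega

def calculate_term_alt (m : Int) (coef : List Int) (h_ : List Int) : Int :=
  if m < (h_.length : Int) then
    PySem.Int.mod ((PySem.List.pyGet? h_ m).getD 0 + 2) 2
  else
    let k := coef.length
    if k == 0 then 0
    else
      let c := coef.map (fun x => PySem.Int.mod x 2)
      let seed := (List.range k).map (fun (i : Nat) =>
        if ((i:Int)+1) < (h_.length:Int) then PySem.Int.mod (h_.getD (i+1) 0) 2 else 0)
      let mat := ((List.range (k-1)).map (fun i =>
          (List.range k).map (fun j => if j == i+1 then (1:Int) else 0)))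
        ++ [(List.range k).map (fun j => c.getD (k-1-j) 0)]
      let idm := (List.range k).map (fun i => (List.range k).map (fun j => if i == j then (1:Int) else 0))
      let res := pvLoopB k idm mat m
      PySem.Int.mod (((List.range k).map (fun j => (res.getD 0 []).getD j 0 * seed.getD j 0)).sum) 2

-- ===== PRECONDITION & SPEC =====
-- Pre_ excludes exactly the inputs on which the Python A raises IndexError
-- (m < -len(h), where h[m] is out of range); B raises the same error there.
def Pre_calculate_term (m : Int) (coef : List Int) (h_ : List Int) : Prop :=
  m < (h_.length : Int) → -(h_.length : Int) ≤ m
instance (m : Int) (coef : List Int) (h_ : List Int) : Decidable (Pre_calculate_term m coef h_) := by unfold Pre_calculate_term; infer_instance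
def pvWitness_calculate_term : Int × List Int × List Int := (7, [1, 1], [1, 1, 0])
def Spec_calculate_term (m : Int) (coef : List Int) (h_ : List Int) (out : Int) : Prop := out = calculate_term_alt m coef h_
instance (m : Int) (coef : List Int) (h_ : List Int) (out : Int) : Decidable (Spec_calculate_term m coef h_ out) := by unfold Spec_calculate_term; infer_instance

-- ===== CLAIM (what is proved, stated in full; the proofs are below) =====
def Claim_equal_calculate_term : Prop := ∀ (m : Int) (coef : List Int) (h_ : List Int), Dom_calculate_term m coef h_ → Pre_calculate_term m coef h_ → Spec_calculate_term m coef h_ (calculate_term m coef h_)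

-- ===== LEMMAS AND PROOFS =====
def pvC (coef : List Int) (j : ℕ) : ZMod 2 := ((coef.getD j 0 : Int) : ZMod 2)

def pvU (coef h_ : List Int) (n : ℕ) : ZMod 2 :=
  if _h0 : coef.length = 0 then 0
  else if _hn : n < coef.length then
    (if n+1 < h_.length then ((h_.getD (n+1) 0 : Int) : ZMod 2) else 0)
  else ∑ j ∈ Finset.range coef.length, pvC coef j * pvU coef h_ (n - 1 - j)
termination_by n
decreasing_by omega

lemma pvU_seed (coef h_ : List Int) (n : ℕ) (hk : coef.length ≠ 0) (hn : n < coef.length) :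
    pvU coef h_ n = if n+1 < h_.length then ((h_.getD (n+1) 0 : Int) : ZMod 2) else 0 := by
  rw [pvU]; simp [hk, hn]

lemma pvU_rec (coef h_ : List Int) (n : ℕ) (hk : coef.length ≠ 0) (hn : coef.length ≤ n) :
    pvU coef h_ n = ∑ j ∈ Finset.range coef.length, pvC coef j * pvU coef h_ (n - 1 - j) := by
  rw [pvU]; simp [hk, Nat.not_lt.mpr hn]

lemma pvHW (coef h_ : List Int) (t : ℕ) (hk : coef.length ≠ 0) :
    ∀ n, coef.length ≤ n → pvU coef h_ (n+t)
      = ∑ j ∈ Finset.range coef.length, pvC coef j * pvU coef h_ (n - 1 - j + t) := by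
  intro n hn
  rw [pvU_rec coef h_ (n+t) hk (le_trans hn (Nat.le_add_right _ _))]
  refine Finset.sum_congr rfl (fun j hj => ?_)
  have hj' : j < coef.length := Finset.mem_range.mp hj
  have : n + t - 1 - j = n - 1 - j + t := by omega
  rw [this]

lemma pvCastMod (x : Int) : ((PySem.Int.mod x 2 : Int) : ZMod 2) = (x : ZMod 2) := by
  rw [PySem.Int.mod_eq_emod_of_pos (by norm_num)]
  exact Eq.symm (CharTwo.intCast_eq_mod x)

lemma pvGetD_set (r : List Int) (idx i : ℕ) (v : Int) :
    (r.set idx v).getD i 0 = if idx = i ∧ idx < r.length then v else r.getD i 0 := by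
  simp only [List.getD_eq_getElem?_getD, List.getElem?_set]
  by_cases h1 : idx = i
  · subst h1
    by_cases h2 : idx < r.length <;> simp [h2]
  · simp [h1]

def pvF (r : List Int) (i : ℕ) : ZMod 2 := ((r.getD i 0 : Int) : ZMod 2)

def pvS (N : ℕ) (r : List Int) (w : ℕ → ZMod 2) : ZMod 2 := ∑ i ∈ Finset.range N, pvF r i * w i

lemma pvF_set (r : List Int) (idx i : ℕ) (v : Int) :
    pvF (r.set idx v) i = if idx = i ∧ idx < r.length then ((v : Int) : ZMod 2) else pvF r i := by
  unfold pvF; rw [pvGetD_set]; split <;> rfl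

lemma pvPass (tgt : ℕ → ℕ) (g : ℕ → Int) (js : List ℕ) :
    ∀ (r : List Int), (∀ j ∈ js, tgt j < r.length) →
    (js.foldl (fun r j => r.set (tgt j) (PySem.Int.mod (r.getD (tgt j) 0 + g j) 2)) r).length = r.length
    ∧ ∀ i, pvF (js.foldl (fun r j => r.set (tgt j) (PySem.Int.mod (r.getD (tgt j) 0 + g j) 2)) r) i
        = pvF r i + ((js.filter (fun j => tgt j = i)).map (fun j => ((g j : Int) : ZMod 2))).sum := by
  induction js with
  | nil => simp
  | cons j0 js ih =>
    intro r hr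
    simp only [List.foldl_cons]
    have hlen1 : (r.set (tgt j0) (PySem.Int.mod (r.getD (tgt j0) 0 + g j0) 2)).length = r.length := by
      simp
    obtain ⟨hl, hp⟩ := ih _ (fun j hj => by rw [hlen1]; exact hr j (List.mem_cons_of_mem _ hj))
    refine ⟨by rw [hl, hlen1], fun i => ?_⟩
    rw [hp i]
    have hlt : tgt j0 < r.length := hr j0 (List.mem_cons_self)
    have hF : pvF (r.set (tgt j0) (PySem.Int.mod (r.getD (tgt j0) 0 + g j0) 2)) i
        = pvF r i + (if tgt j0 = i then ((g j0 : Int) : ZMod 2) else 0) := by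
      rw [pvF_set]
      by_cases hji : tgt j0 = i
      · simp only [hji, if_pos, true_and]
        rw [pvCastMod]
        push_cast
        subst hji
        unfold pvF
        simp [hlt]
      · simp [hji]
    rw [hF]
    by_cases hji : tgt j0 = i
    · simp only [List.filter_cons, hji, decide_true, if_pos, List.map_cons, List.sum_cons]
      ring
    · simp only [List.filter_cons, hji, decide_false, Bool.false_eq_true, if_neg,
        not_false_iff, add_zero]

lemma pvExchange (js : List ℕ) (c : ℕ → ZMod 2) (tgt : ℕ → ℕ) (w : ℕ → ZMod 2) (N : ℕ) :
    ∑ i ∈ Finset.range N, ((js.filter (fun j => tgt j = i)).map c).sum * w i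
      = (js.map (fun j => if tgt j < N then c j * w (tgt j) else 0)).sum := by
  induction js with
  | nil => simp
  | cons j0 js ih =>
    have hsplit : ∀ i, ((List.filter (fun j => decide (tgt j = i)) (j0 :: js)).map c).sum
        = (if tgt j0 = i then c j0 else 0) + ((js.filter (fun j => tgt j = i)).map c).sum := by
      intro i; by_cases h : tgt j0 = i <;> simp [List.filter_cons, h]
    simp only [hsplit, add_mul, Finset.sum_add_distrib, ih, List.map_cons, List.sum_cons]
    congr 1
    have h1 : ∀ i, (if tgt j0 = i then c j0 else 0) * w i = if tgt j0 = i then c j0 * w i else 0 := by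
      intro i; split <;> simp
    simp only [h1, Finset.sum_ite_eq, Finset.mem_range]

lemma pvS_congr (N : ℕ) (r1 r2 : List Int) (w : ℕ → ZMod 2)
    (h : ∀ i < N, pvF r1 i = pvF r2 i) : pvS N r1 w = pvS N r2 w := by
  unfold pvS
  exact Finset.sum_congr rfl (fun i hi => by rw [h i (Finset.mem_range.mp hi)])

lemma pvS_succ (N : ℕ) (r : List Int) (w : ℕ → ZMod 2) :
    pvS (N+1) r w = pvS N r w + pvF r N * w N := Finset.sum_range_succ _ _

lemma pvPass_S (tgt : ℕ → ℕ) (g : ℕ → Int) (js : List ℕ) (r : List Int) (w : ℕ → ZMod 2) (b : ℕ)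
    (h : ∀ j ∈ js, tgt j < r.length) :
    pvS b (js.foldl (fun r j => r.set (tgt j) (PySem.Int.mod (r.getD (tgt j) 0 + g j) 2)) r) w
      = pvS b r w + (js.map (fun j => if tgt j < b then ((g j : Int) : ZMod 2) * w (tgt j) else 0)).sum := by
  unfold pvS
  simp only [(pvPass tgt g js r h).2, add_mul, Finset.sum_add_distrib]
  rw [pvExchange]

-- convolution phase of pvPolyMul
lemma pvConv (a b : List Int) (k : ℕ) (w : ℕ → ZMod 2) :
    ∀ (is : List ℕ) (r : List Int), (∀ i ∈ is, i < k) → r.length = 2*k →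
    (is.foldl (fun res i =>
      if a.getD i 0 == 0 then res
      else (List.range k).foldl (fun res j =>
        res.set (i+j) (PySem.Int.mod (res.getD (i+j) 0 + a.getD i 0 * b.getD j 0) 2)) res) r).length = 2*k
    ∧ pvS (2*k) (is.foldl (fun res i =>
      if a.getD i 0 == 0 then res
      else (List.range k).foldl (fun res j =>
        res.set (i+j) (PySem.Int.mod (res.getD (i+j) 0 + a.getD i 0 * b.getD j 0) 2)) res) r) w
      = pvS (2*k) r w
        + (is.map (fun i => ((List.range k).map (fun j =>
            ((a.getD i 0 : Int) : ZMod 2) * ((b.getD j 0 : Int) : ZMod 2) * w (i+j))).sum)).sum := by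
  intro is
  induction is with
  | nil => intro r _ hr; exact ⟨hr, by simp⟩
  | cons i0 is ih =>
    intro r his hr
    simp only [List.foldl_cons, List.map_cons, List.sum_cons]
    have hi0 : i0 < k := his i0 (List.mem_cons_self)
    by_cases hz : a.getD i0 0 == 0
    · rw [if_pos hz]
      obtain ⟨hl, hs⟩ := ih r (fun i hi => his i (List.mem_cons_of_mem _ hi)) hr
      refine ⟨hl, ?_⟩
      rw [hs]
      have hz' : a.getD i0 0 = 0 := by exact_mod_cast (beq_iff_eq).mp hz
      have : ((List.range k).map (fun j =>
          ((a.getD i0 0 : Int) : ZMod 2) * ((b.getD j 0 : Int) : ZMod 2) * w (i0+j))).sum = 0 := by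
        apply List.sum_eq_zero
        intro x hx
        rw [List.mem_map] at hx
        obtain ⟨j, _, rfl⟩ := hx
        rw [hz']
        simp
      rw [this]; ring
    · rw [if_neg hz]
      have htgt : ∀ j ∈ List.range k, i0 + j < r.length := by
        intro j hj; have := List.mem_range.mp hj; omega
      have hlen := (pvPass (fun j => i0 + j) (fun j => a.getD i0 0 * b.getD j 0) (List.range k) r htgt).1
      obtain ⟨hl, hs⟩ := ih _ (fun i hi => his i (List.mem_cons_of_mem _ hi)) (by rw [hlen, hr])
      refine ⟨hl, ?_⟩
      rw [hs]
      rw [pvPass_S (fun j => i0 + j) (fun j => a.getD i0 0 * b.getD j 0) (List.range k) r w (2*k) htgt]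
      have : ∀ j ∈ List.range k,
          (if i0 + j < 2*k then ((a.getD i0 0 * b.getD j 0 : Int) : ZMod 2) * w (i0+j) else 0)
            = ((a.getD i0 0 : Int) : ZMod 2) * ((b.getD j 0 : Int) : ZMod 2) * w (i0+j) := by
        intro j hj
        have := List.mem_range.mp hj
        rw [if_pos (by omega)]
        push_cast
        ring
      rw [List.map_congr_left this]
      ring

-- characterisation of the p_coeffs builder loop
lemma pvPbuild (coef : List Int) (k : ℕ) (base : List Int) (hbl : base.length = k+1) :
    ∀ n, n ≤ k →
    ((List.range n).foldl (fun p i => p.set (i+1) (coef.getD i 0)) base).length = k+1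
    ∧ ∀ j, ((List.range n).foldl (fun p i => p.set (i+1) (coef.getD i 0)) base).getD j 0
        = if 1 ≤ j ∧ j ≤ n then coef.getD (j-1) 0 else base.getD j 0 := by
  intro n
  induction n with
  | zero =>
    intro _
    refine ⟨by simpa using hbl, fun j => ?_⟩
    rw [if_neg (by omega)]
    simp
  | succ n ih =>
    intro hn
    obtain ⟨hl, hp⟩ := ih (by omega)
    rw [List.range_succ, List.foldl_append]
    simp only [List.foldl_cons, List.foldl_nil]
    refine ⟨by rw [List.length_set]; exact hl, fun j => ?_⟩
    rw [pvGetD_set]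
    by_cases hj : n+1 = j
    · rw [if_pos ⟨hj, by rw [hl]; omega⟩]
      subst hj
      rw [if_pos (by omega)]
      simp
    · rw [if_neg (by exact fun hc => hj hc.1)]
      rw [hp j]
      have : (1 ≤ j ∧ j ≤ n+1) ↔ (1 ≤ j ∧ j ≤ n) := by omega
      simp only [this]

-- one step of the reduction phase
lemma pvRedStep (coef h_ : List Int) (p : List Int)
    (hp : ∀ j, 1 ≤ j → j ≤ coef.length → p.getD j 0 = coef.getD (j-1) 0)
    (w : ℕ → ZMod 2)
    (hw : ∀ n, coef.length ≤ n → w n = ∑ j ∈ Finset.range coef.length, pvC coef j * w (n - 1 - j))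
    (i : ℕ) (hik : coef.length ≤ i) (hi2 : i < 2*coef.length)
    (r : List Int) (hr : r.length = 2*coef.length) (C : ZMod 2) (hS : pvS (i+1) r w = C) :
    (if r.getD i 0 == 0 then r
     else (List.range (coef.length+1)).foldl (fun (res : List Int) (j : Nat) =>
          if (0:Int) ≤ (i:Int) - (j:Int) then
            res.set (i-j) (PySem.Int.mod (res.getD (i-j) 0 + r.getD i 0 * p.getD j 0) 2)
          else res) (r.set i 0)).length = 2*coef.length
    ∧ pvS i (if r.getD i 0 == 0 then r
     else (List.range (coef.length+1)).foldl (fun (res : List Int) (j : Nat) =>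
          if (0:Int) ≤ (i:Int) - (j:Int) then
            res.set (i-j) (PySem.Int.mod (res.getD (i-j) 0 + r.getD i 0 * p.getD j 0) 2)
          else res) (r.set i 0)) w = C := by
  set k := coef.length with hk
  have hSi : pvS i r w = C - pvF r i * w i := by
    rw [← hS, pvS_succ]; ring
  by_cases hz : r.getD i 0 == 0
  · rw [if_pos hz]
    have hz' : r.getD i 0 = 0 := by exact_mod_cast (beq_iff_eq).mp hz
    refine ⟨hr, ?_⟩
    rw [hSi]
    have : pvF r i = 0 := by unfold pvF; rw [hz']; simp
    rw [this]; ring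
  · rw [if_neg hz]
    -- the guard is always true: j ≤ k ≤ i
    have hcong : (List.range (k+1)).foldl (fun (res : List Int) (j : Nat) =>
          if (0:Int) ≤ (i:Int) - (j:Int) then
            res.set (i-j) (PySem.Int.mod (res.getD (i-j) 0 + r.getD i 0 * p.getD j 0) 2)
          else res) (r.set i 0)
        = (List.range (k+1)).foldl (fun (res : List Int) (j : Nat) =>
            res.set (i-j) (PySem.Int.mod (res.getD (i-j) 0 + r.getD i 0 * p.getD j 0) 2)) (r.set i 0) := by
      apply PySem.List.foldl_congr_mem
      intro acc j hj
      have := List.mem_range.mp hj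
      rw [if_pos (by omega)]
    rw [hcong]
    have htgt : ∀ j ∈ List.range (k+1), i - j < (r.set i 0).length := by
      intro j hj; simp only [List.length_set, hr]; omega
    refine ⟨by rw [(pvPass _ _ _ _ htgt).1]; simp [hr], ?_⟩
    rw [pvPass_S _ _ _ _ _ _ htgt]
    have hset : pvS i (r.set i 0) w = pvS i r w := by
      apply pvS_congr
      intro i' hi'
      rw [pvF_set, if_neg (by omega)]
    rw [hset]
    -- evaluate the correction sum
    rw [List.range_succ_eq_map]
    simp only [List.map_cons, List.sum_cons, List.map_map]
    rw [if_neg (by omega)]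
    have hterm : ∀ j' ∈ List.range k,
        ((fun j => if i - j < i then ((r.getD i 0 * p.getD j 0 : Int) : ZMod 2) * w (i-j) else 0) ∘ Nat.succ) j'
          = ((r.getD i 0 : Int) : ZMod 2) * (pvC coef j' * w (i-1-j')) := by
      intro j' hj'
      have hj'k := List.mem_range.mp hj'
      simp only [Function.comp]
      rw [if_pos (by omega)]
      rw [hp (j'+1) (by omega) (by omega)]
      have h1 : j' + 1 - 1 = j' := by omega
      have h2 : i - (j'+1) = i - 1 - j' := by omega
      rw [h1, h2]
      unfold pvC
      push_cast
      ring
    rw [List.map_congr_left hterm]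
    have hfin : (List.map (fun j' => ((r.getD i 0 : Int) : ZMod 2) * (pvC coef j' * w (i-1-j'))) (List.range k)).sum
        = ((r.getD i 0 : Int) : ZMod 2) * ∑ j' ∈ Finset.range k, pvC coef j' * w (i-1-j') := by
      rw [Finset.mul_sum]
      rfl
    rw [hfin, ← hw i hik, hSi]
    have : pvF r i = ((r.getD i 0 : Int) : ZMod 2) := rfl
    rw [this]
    ring

lemma pvS_replicate (n N : ℕ) (w : ℕ → ZMod 2) : pvS N (List.replicate n (0:Int)) w = 0 := by
  unfold pvS
  apply Finset.sum_eq_zero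
  intro i _
  have : pvF (List.replicate n (0:Int)) i = 0 := by
    unfold pvF
    by_cases h : i < n
    · rw [List.getD_replicate _ h]; simp
    · rw [List.getD_eq_default _ _ (by simpa using Nat.le_of_not_lt h)]; simp
  rw [this]; ring

lemma pvF_take (X : List Int) (k i : ℕ) (hi : i < k) : pvF (X.take k) i = pvF X i := by
  unfold pvF
  simp only [List.getD_eq_getElem?_getD, List.getElem?_take, if_pos hi]

-- full reduction loop
lemma pvRed (coef p : List Int)
    (hp : ∀ j, 1 ≤ j → j ≤ coef.length → p.getD j 0 = coef.getD (j-1) 0)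
    (w : ℕ → ZMod 2)
    (hw : ∀ n, coef.length ≤ n → w n = ∑ j ∈ Finset.range coef.length, pvC coef j * w (n - 1 - j)) :
    ∀ n, n ≤ coef.length → ∀ r, r.length = 2*coef.length → ∀ C, pvS (2*coef.length) r w = C →
    (((List.range n).map (fun t => 2*coef.length-1-t)).foldl (fun (res : List Int) (i : Nat) =>
        if res.getD i 0 == 0 then res
        else (List.range (coef.length+1)).foldl (fun (res2 : List Int) (j : Nat) =>
          if (0:Int) ≤ (i:Int) - (j:Int) then
            res2.set (i-j) (PySem.Int.mod (res2.getD (i-j) 0 + res.getD i 0 * p.getD j 0) 2)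
          else res2) (res.set i 0)) r).length = 2*coef.length
    ∧ pvS (2*coef.length - n) (((List.range n).map (fun t => 2*coef.length-1-t)).foldl (fun (res : List Int) (i : Nat) =>
        if res.getD i 0 == 0 then res
        else (List.range (coef.length+1)).foldl (fun (res2 : List Int) (j : Nat) =>
          if (0:Int) ≤ (i:Int) - (j:Int) then
            res2.set (i-j) (PySem.Int.mod (res2.getD (i-j) 0 + res.getD i 0 * p.getD j 0) 2)
          else res2) (res.set i 0)) r) w = C := by
  intro n
  induction n with
  | zero =>
    intro _ r hr C hC
    simpa using ⟨hr, hC⟩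
  | succ n ih =>
    intro hn r hr C hC
    obtain ⟨hl, hs⟩ := ih (by omega) r hr C hC
    have hsplit : (List.map (fun t => 2*coef.length-1-t) (List.range (n+1)))
        = (List.map (fun t => 2*coef.length-1-t) (List.range n)) ++ [2*coef.length-1-n] := by
      rw [List.range_succ, List.map_append]
      simp
    rw [hsplit, List.foldl_append]
    simp only [List.foldl_cons, List.foldl_nil]
    have e1 : 2*coef.length - n = (2*coef.length-1-n)+1 := by omega
    rw [e1] at hs
    have := pvRedStep coef coef p hp w hw (2*coef.length-1-n) (by omega) (by omega) _ hl C hs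
    have e2 : 2*coef.length - (n+1) = 2*coef.length-1-n := by omega
    rw [e2]
    exact this

-- the weighted sum computed by poly_mul
lemma pvPolyMul_S (coef : List Int) (a b p : List Int) (hk : coef.length ≠ 0)
    (hp : ∀ j, 1 ≤ j → j ≤ coef.length → p.getD j 0 = coef.getD (j-1) 0)
    (w : ℕ → ZMod 2)
    (hw : ∀ n, coef.length ≤ n → w n = ∑ j ∈ Finset.range coef.length, pvC coef j * w (n - 1 - j)) :
    pvS coef.length (pvPolyMul a b coef.length p) w
      = ∑ i ∈ Finset.range coef.length, ∑ j ∈ Finset.range coef.length,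
          ((a.getD i 0 : Int) : ZMod 2) * ((b.getD j 0 : Int) : ZMod 2) * w (i+j) := by
  set k := coef.length with hkdef
  obtain ⟨hcl, hcs⟩ := pvConv a b k w (List.range k)
    (List.replicate (2*k) 0) (fun i hi => List.mem_range.mp hi) (by simp)
  rw [pvS_replicate] at hcs
  obtain ⟨hrl, hrs⟩ := pvRed coef p hp w hw k (le_refl k) _ hcl _ hcs
  unfold pvPolyMul
  have e3 : 2*k - k = k := by omega
  rw [e3] at hrs
  have htake : pvS k ((((List.range k).map (fun t => 2*k-1-t)).foldl (fun (res : List Int) (i : Nat) =>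
        if res.getD i 0 == 0 then res
        else (List.range (k+1)).foldl (fun (res2 : List Int) (j : Nat) =>
          if (0:Int) ≤ (i:Int) - (j:Int) then
            res2.set (i-j) (PySem.Int.mod (res2.getD (i-j) 0 + res.getD i 0 * p.getD j 0) 2)
          else res2) (res.set i 0)) ((List.range k).foldl (fun res i =>
      if a.getD i 0 == 0 then res
      else (List.range k).foldl (fun res j =>
        res.set (i+j) (PySem.Int.mod (res.getD (i+j) 0 + a.getD i 0 * b.getD j 0) 2)) res)
      (List.replicate (2*k) (0:Int)))).take k) w
      = ∑ i ∈ Finset.range k, ∑ j ∈ Finset.range k,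
          ((a.getD i 0 : Int) : ZMod 2) * ((b.getD j 0 : Int) : ZMod 2) * w (i+j) := by
    rw [pvS_congr k _ _ w (fun i hi => pvF_take _ _ _ hi)]
    rw [hrs]
    rw [zero_add]
    rfl
  exact htake

lemma pvS_single (N i0 : ℕ) (hi : i0 < N) (r : List Int) (v : ZMod 2) (w : ℕ → ZMod 2)
    (h : ∀ i, pvF r i = if i = i0 then v else 0) : pvS N r w = v * w i0 := by
  unfold pvS
  simp only [h]
  have hsplit : ∀ i, (if i = i0 then v else 0) * w i = if i = i0 then v * w i else 0 := by
    intro i; split <;> simp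
  simp only [hsplit, Finset.sum_ite_eq', Finset.mem_range, if_pos hi]

lemma pvMulClass (coef h_ p a b : List Int) (α β : ℕ) (hk : coef.length ≠ 0)
    (hp : ∀ j, 1 ≤ j → j ≤ coef.length → p.getD j 0 = coef.getD (j-1) 0)
    (ha : ∀ t, pvS coef.length a (fun i => pvU coef h_ (i+t)) = pvU coef h_ (α+t))
    (hb : ∀ t, pvS coef.length b (fun i => pvU coef h_ (i+t)) = pvU coef h_ (β+t)) :
    ∀ t, pvS coef.length (pvPolyMul a b coef.length p) (fun i => pvU coef h_ (i+t))
      = pvU coef h_ (α+β+t) := by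
  intro t
  rw [pvPolyMul_S coef a b p hk hp _ (pvHW coef h_ t hk)]
  have h1 : ∀ j ∈ Finset.range coef.length,
      ∑ i ∈ Finset.range coef.length,
        ((a.getD i 0 : Int) : ZMod 2) * ((b.getD j 0 : Int) : ZMod 2) * pvU coef h_ (i+j+t)
      = ((b.getD j 0 : Int) : ZMod 2) * pvU coef h_ (j+(α+t)) := by
    intro j _
    have h2 : ∀ i ∈ Finset.range coef.length,
        ((a.getD i 0 : Int) : ZMod 2) * ((b.getD j 0 : Int) : ZMod 2) * pvU coef h_ (i+j+t)
          = ((b.getD j 0 : Int) : ZMod 2) * (pvF a i * pvU coef h_ (i+(j+t))) := by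
      intro i _
      have e : i+j+t = i+(j+t) := by omega
      rw [e]
      unfold pvF
      ring
    rw [Finset.sum_congr rfl h2, ← Finset.mul_sum]
    have h3 := ha (j+t)
    unfold pvS at h3
    rw [h3]
    have e : α+(j+t) = j+(α+t) := by omega
    rw [e]
  rw [Finset.sum_comm, Finset.sum_congr rfl h1]
  have h4 := hb (α+t)
  unfold pvS at h4
  unfold pvF at h4
  rw [h4]
  have e : β+(α+t) = α+β+t := by omega
  rw [e]

lemma pvLoopA_class (coef h_ p : List Int) (hk : coef.length ≠ 0)
    (hp : ∀ j, 1 ≤ j → j ≤ coef.length → p.getD j 0 = coef.getD (j-1) 0) :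
    ∀ N (power : Int), power.toNat = N → 0 ≤ power → ∀ f g α β,
    (∀ t, pvS coef.length f (fun i => pvU coef h_ (i+t)) = pvU coef h_ (α+t)) →
    (∀ t, pvS coef.length g (fun i => pvU coef h_ (i+t)) = pvU coef h_ (β+t)) →
    ∀ t, pvS coef.length (pvLoopA coef.length p f g power) (fun i => pvU coef h_ (i+t))
      = pvU coef h_ (α + power.toNat * β + t) := by
  intro N
  induction N using Nat.strong_induction_on with
  | _ N ih =>
    intro power hN hpow f g α β hf hg t
    rw [pvLoopA]
    by_cases h0 : 0 < power
    · rw [dif_pos h0]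
      have hg' := pvMulClass coef h_ p g g β β hk hp hg hg
      have hlt : (power >>> (1:Nat)).toNat < N := by
        rw [Int.shiftRight_eq_div_pow]
        omega
      have hpow' : 0 ≤ power >>> (1:Nat) := by
        rw [Int.shiftRight_eq_div_pow]
        omega
      by_cases hodd : power % 2 = 1
      · have hcond : (PySem.Int.band power 1 == 1) = true := by
          rw [PySem.Int.band_one, PySem.Int.mod_eq_emod_of_pos (by norm_num), hodd]
          rfl
        rw [if_pos hcond]
        have hf' := pvMulClass coef h_ p f g α β hk hp hf hg
        have := ih _ hlt (power >>> (1:Nat)) rfl hpow' _ _ (α+β) (β+β) hf' hg' t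
        rw [this]
        congr 1
        rw [Int.shiftRight_eq_div_pow]
        norm_num
        have hq : power.toNat = 2 * (power / 2).toNat + 1 := by omega
        rw [hq]
        ring
      · have heven : power % 2 = 0 := by omega
        have hcond : (PySem.Int.band power 1 == 1) = false := by
          rw [PySem.Int.band_one, PySem.Int.mod_eq_emod_of_pos (by norm_num), heven]
          rfl
        rw [if_neg (by simp [hcond])]
        have := ih _ hlt (power >>> (1:Nat)) rfl hpow' _ _ α (β+β) hf hg' t
        rw [this]
        congr 1
        rw [Int.shiftRight_eq_div_pow]
        norm_num
        have hq : power.toNat = 2 * (power / 2).toNat := by omega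
        rw [hq]
        ring
    · rw [dif_neg h0]
      have hz : power = 0 := by omega
      subst hz
      simpa using hf t

lemma pvF_replicate (n i : ℕ) : pvF (List.replicate n (0:Int)) i = 0 := by
  unfold pvF
  by_cases h : i < n
  · rw [List.getD_replicate _ h]; simp
  · rw [List.getD_eq_default _ _ (by simpa using Nat.le_of_not_lt h)]; simp

-- the final answer-accumulation loop of A
lemma pvAnsFold (h_ f : List Int) : ∀ n,
    0 ≤ (List.range n).foldl (fun (acc : Int) (i : Nat) =>
        if ((i:Int)+1) < (h_.length:Int) then PySem.Int.mod (acc + h_.getD (i+1) 0 * f.getD i 0) 2 else acc) 0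
    ∧ (List.range n).foldl (fun (acc : Int) (i : Nat) =>
        if ((i:Int)+1) < (h_.length:Int) then PySem.Int.mod (acc + h_.getD (i+1) 0 * f.getD i 0) 2 else acc) 0 < 2
    ∧ (((List.range n).foldl (fun (acc : Int) (i : Nat) =>
        if ((i:Int)+1) < (h_.length:Int) then PySem.Int.mod (acc + h_.getD (i+1) 0 * f.getD i 0) 2 else acc) 0 : Int) : ZMod 2)
      = ∑ i ∈ Finset.range n,
          (if ((i:Int)+1) < (h_.length:Int) then ((h_.getD (i+1) 0 : Int) : ZMod 2) else 0) * pvF f i := by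
  intro n
  induction n with
  | zero => simp
  | succ n ih =>
    obtain ⟨ih0, ih1, ih2⟩ := ih
    rw [List.range_succ, List.foldl_append]
    simp only [List.foldl_cons, List.foldl_nil]
    rw [Finset.sum_range_succ]
    by_cases hc : ((n:Int)+1) < (h_.length:Int)
    · rw [if_pos hc, if_pos hc]
      refine ⟨PySem.Int.mod_nonneg _ (by norm_num), PySem.Int.mod_lt _ (by norm_num), ?_⟩
      rw [pvCastMod]
      push_cast
      rw [ih2]
      unfold pvF
      ring
    · rw [if_neg hc, if_neg hc]
      refine ⟨ih0, ih1, ?_⟩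
      rw [ih2]
      ring

lemma pvA_main (m : Int) (coef h_ : List Int) (hk : coef.length ≠ 0) (hm : ¬ m < (h_.length : Int)) :
    0 ≤ calculate_term m coef h_ ∧ calculate_term m coef h_ < 2 ∧
    ((calculate_term m coef h_ : Int) : ZMod 2) = pvU coef h_ m.toNat := by
  have hm0 : 0 ≤ m := by
    have : (0:Int) ≤ (h_.length : Int) := by positivity
    omega
  have hbeq : ¬ ((coef.length == 0) = true) := by simpa using hk
  set P := (List.range coef.length).foldl (fun p i => p.set (i+1) (coef.getD i 0))
      ((List.replicate (coef.length+1) (0:Int)).set 0 (PySem.Int.mod (2-1) 2)) with hPdef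
  set F0 := (List.replicate coef.length (0:Int)).set 0 (1:Int) with hF0def
  set G0 := (if coef.length == 1 then (List.replicate coef.length (0:Int)).set 0 (P.getD 1 0)
      else (List.replicate coef.length (0:Int)).set 1 1) with hG0def
  have hA : calculate_term m coef h_ = PySem.Int.mod ((List.range coef.length).foldl
      (fun (acc : Int) (i : Nat) => if ((i:Int)+1) < (h_.length:Int)
        then PySem.Int.mod (acc + h_.getD (i+1) 0 * (pvLoopA coef.length P F0 G0 m).getD i 0) 2
        else acc) 0 + 2) 2 := by
    unfold calculate_term
    rw [if_neg hm, if_neg hbeq]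
  -- properties of the built modulus list P
  have hPb := pvPbuild coef coef.length ((List.replicate (coef.length+1) (0:Int)).set 0 (PySem.Int.mod (2-1) 2))
      (by simp) coef.length (le_refl _)
  have hp : ∀ j, 1 ≤ j → j ≤ coef.length → P.getD j 0 = coef.getD (j-1) 0 := by
    intro j h1 h2
    rw [hPdef, hPb.2 j, if_pos ⟨h1, h2⟩]
  -- class of the initial f
  have hf0 : ∀ i, pvF F0 i = if i = 0 then 1 else 0 := by
    intro i
    rw [hF0def, pvF_set]
    by_cases hi : i = 0
    · subst hi
      rw [if_pos ⟨rfl, by simp; omega⟩, if_pos rfl]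
      simp
    · rw [if_neg (by intro hc; exact hi hc.1.symm), if_neg hi, pvF_replicate]
  have hfc : ∀ t, pvS coef.length F0 (fun i => pvU coef h_ (i+t)) = pvU coef h_ (0+t) := by
    intro t
    rw [pvS_single coef.length 0 (by omega) F0 1 _ hf0]
    simp
  -- class of the initial g
  have hgc : ∀ t, pvS coef.length G0 (fun i => pvU coef h_ (i+t)) = pvU coef h_ (1+t) := by
    intro t
    by_cases hk1 : coef.length = 1
    · have hbe : (coef.length == 1) = true := by simpa using hk1
      have hg0 : ∀ i, pvF G0 i = if i = 0 then ((coef.getD 0 0 : Int) : ZMod 2) else 0 := by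
        intro i
        rw [hG0def, if_pos hbe, pvF_set]
        by_cases hi : i = 0
        · subst hi
          rw [if_pos ⟨rfl, by simp; omega⟩, if_pos rfl, hp 1 (le_refl _) (by omega)]
        · rw [if_neg (by intro hc; exact hi hc.1.symm), if_neg hi, pvF_replicate]
      rw [pvS_single coef.length 0 (by omega) G0 _ _ hg0]
      rw [pvU_rec coef h_ (1+t) hk (by omega)]
      rw [hk1, Finset.sum_range_one]
      unfold pvC
      rw [show (1+t-1-0 : ℕ) = 0+t from by omega]
    · have hbe : ¬ ((coef.length == 1) = true) := by simpa using hk1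
      have hg0 : ∀ i, pvF G0 i = if i = 1 then 1 else 0 := by
        intro i
        rw [hG0def, if_neg hbe, pvF_set]
        by_cases hi : i = 1
        · subst hi
          rw [if_pos ⟨rfl, by simp; omega⟩, if_pos rfl]
          simp
        · rw [if_neg (by intro hc; exact hi hc.1.symm), if_neg hi, pvF_replicate]
      rw [pvS_single coef.length 1 (by omega) G0 1 _ hg0]
      simp
  -- run the exponentiation loop
  have hloop := pvLoopA_class coef h_ P hk hp m.toNat m rfl hm0 F0 G0 0 1 hfc hgc 0
  obtain ⟨b0, b1, b2⟩ := pvAnsFold h_ (pvLoopA coef.length P F0 G0 m) coef.length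
  have hmod : PySem.Int.mod ((List.range coef.length).foldl
      (fun (acc : Int) (i : Nat) => if ((i:Int)+1) < (h_.length:Int)
        then PySem.Int.mod (acc + h_.getD (i+1) 0 * (pvLoopA coef.length P F0 G0 m).getD i 0) 2
        else acc) 0 + 2) 2 = (List.range coef.length).foldl
      (fun (acc : Int) (i : Nat) => if ((i:Int)+1) < (h_.length:Int)
        then PySem.Int.mod (acc + h_.getD (i+1) 0 * (pvLoopA coef.length P F0 G0 m).getD i 0) 2
        else acc) 0 := by
    rw [PySem.Int.mod_eq_emod_of_pos (by norm_num)]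
    omega
  rw [hA, hmod]
  refine ⟨b0, b1, ?_⟩
  rw [b2]
  have hseed : ∀ i ∈ Finset.range coef.length,
      (if ((i:Int)+1) < (h_.length:Int) then ((h_.getD (i+1) 0 : Int) : ZMod 2) else 0)
        * pvF (pvLoopA coef.length P F0 G0 m) i
      = pvF (pvLoopA coef.length P F0 G0 m) i * pvU coef h_ (i+0) := by
    intro i hi
    have hik := Finset.mem_range.mp hi
    have hcond : (((i:Int)+1) < (h_.length:Int)) ↔ (i+1 < h_.length) := by omega
    rw [pvU_seed coef h_ (i+0) hk (by omega)]
    by_cases hc : i+1 < h_.length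
    · rw [if_pos (hcond.mpr hc)]
      have : i+0+1 = i+1 := by omega
      rw [this, if_pos hc]
      ring
    · rw [if_neg (fun hx => hc (hcond.mp hx))]
      have : i+0+1 = i+1 := by omega
      rw [this, if_neg hc]
      ring
  rw [Finset.sum_congr rfl hseed]
  have : ∑ i ∈ Finset.range coef.length,
      pvF (pvLoopA coef.length P F0 G0 m) i * pvU coef h_ (i+0)
      = pvS coef.length (pvLoopA coef.length P F0 G0 m) (fun i => pvU coef h_ (i+0)) := rfl
  rw [this, hloop]
  congr 1
  omega

-- ===== B side =====
def pvG (X : List (List Int)) (i j : ℕ) : ZMod 2 := (((X.getD i []).getD j 0 : Int) : ZMod 2)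

lemma pvMatMul_entry (k : ℕ) (x y : List (List Int)) (i j : ℕ) (hi : i < k) (hj : j < k) :
    pvG (pvMatMul k x y) i j = ∑ l ∈ Finset.range k, pvG x i l * pvG y l j := by
  unfold pvMatMul pvG
  rw [PySem.List.getD_map_range _ _ _ _ hi, PySem.List.getD_map_range _ _ _ _ hj, pvCastMod]
  rw [Int.cast_list_sum, List.map_map]
  have : ∀ l, ((fun (z : Int) => (z : ZMod 2)) ∘ fun l =>
      (x.getD i []).getD l 0 * (y.getD l []).getD j 0) l
      = (((x.getD i []).getD l 0 : Int) : ZMod 2) * (((y.getD l []).getD j 0 : Int) : ZMod 2) := by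
    intro l; simp
  rw [List.map_congr_left (fun l _ => this l)]
  rfl

lemma pvInv_mul (coef h_ : List Int) (x y : List (List Int)) (ex ey : ℕ)
    (hx : ∀ i, i < coef.length → ∀ t, ∑ j ∈ Finset.range coef.length,
        pvG x i j * pvU coef h_ (j+t) = pvU coef h_ (i+ex+t))
    (hy : ∀ i, i < coef.length → ∀ t, ∑ j ∈ Finset.range coef.length,
        pvG y i j * pvU coef h_ (j+t) = pvU coef h_ (i+ey+t)) :
    ∀ i, i < coef.length → ∀ t, ∑ j ∈ Finset.range coef.length,
        pvG (pvMatMul coef.length x y) i j * pvU coef h_ (j+t) = pvU coef h_ (i+(ex+ey)+t) := by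
  intro i hi t
  have h1 : ∀ j ∈ Finset.range coef.length,
      pvG (pvMatMul coef.length x y) i j * pvU coef h_ (j+t)
        = ∑ l ∈ Finset.range coef.length, pvG x i l * (pvG y l j * pvU coef h_ (j+t)) := by
    intro j hj
    rw [pvMatMul_entry coef.length x y i j hi (Finset.mem_range.mp hj), Finset.sum_mul]
    exact Finset.sum_congr rfl (fun l _ => by ring)
  rw [Finset.sum_congr rfl h1, Finset.sum_comm]
  have h2 : ∀ l ∈ Finset.range coef.length,
      ∑ j ∈ Finset.range coef.length, pvG x i l * (pvG y l j * pvU coef h_ (j+t))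
        = pvG x i l * pvU coef h_ (l+(ey+t)) := by
    intro l hl
    rw [← Finset.mul_sum, hy l (Finset.mem_range.mp hl) t]
    have e : l+ey+t = l+(ey+t) := by omega
    rw [e]
  rw [Finset.sum_congr rfl h2, hx i hi (ey+t)]
  congr 1
  omega

lemma pvLoopB_class (coef h_ : List Int) :
    ∀ N (e : Int), e.toNat = N → 0 ≤ e → ∀ X Y ex ey,
    (∀ i, i < coef.length → ∀ t, ∑ j ∈ Finset.range coef.length,
        pvG X i j * pvU coef h_ (j+t) = pvU coef h_ (i+ex+t)) →
    (∀ i, i < coef.length → ∀ t, ∑ j ∈ Finset.range coef.length,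
        pvG Y i j * pvU coef h_ (j+t) = pvU coef h_ (i+ey+t)) →
    ∀ i, i < coef.length → ∀ t, ∑ j ∈ Finset.range coef.length,
        pvG (pvLoopB coef.length X Y e) i j * pvU coef h_ (j+t)
      = pvU coef h_ (i+(ex + e.toNat * ey)+t) := by
  intro N
  induction N using Nat.strong_induction_on with
  | _ N ih =>
    intro e hN hpow X Y ex ey hX hY i hi t
    rw [pvLoopB]
    by_cases h0 : 0 < e
    · rw [if_pos h0]
      have hY' := pvInv_mul coef h_ Y Y ey ey hY hY
      have hfd : PySem.Int.floordiv e 2 = e / 2 := PySem.Int.floordiv_eq_ediv_of_pos (by norm_num)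
      have hlt : (PySem.Int.floordiv e 2).toNat < N := by rw [hfd]; omega
      have hpow' : 0 ≤ PySem.Int.floordiv e 2 := by rw [hfd]; omega
      by_cases hodd : e % 2 = 1
      · have hcond : (PySem.Int.mod e 2 == 1) = true := by
          rw [PySem.Int.mod_eq_emod_of_pos (by norm_num), hodd]
          rfl
        rw [if_pos hcond]
        have hX' := pvInv_mul coef h_ X Y ex ey hX hY
        have := ih _ hlt (PySem.Int.floordiv e 2) rfl hpow' _ _ (ex+ey) (ey+ey) hX' hY' i hi t
        rw [this]
        congr 1
        rw [hfd]
        have hq : e.toNat = 2 * (e / 2).toNat + 1 := by omega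
        rw [hq]
        ring
      · have heven : e % 2 = 0 := by omega
        have hcond : (PySem.Int.mod e 2 == 1) = false := by
          rw [PySem.Int.mod_eq_emod_of_pos (by norm_num), heven]
          rfl
        rw [if_neg (by rw [hcond]; exact Bool.false_ne_true)]
        have := ih _ hlt (PySem.Int.floordiv e 2) rfl hpow' _ _ ex (ey+ey) hX hY' i hi t
        rw [this]
        congr 1
        rw [hfd]
        have hq : e.toNat = 2 * (e / 2).toNat := by omega
        rw [hq]
        ring
    · rw [if_neg h0]
      have hz : e = 0 := by omega
      subst hz
      simpa using hX i hi t

lemma pvIdm_inv (coef h_ : List Int) :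
    ∀ i, i < coef.length → ∀ t, ∑ j ∈ Finset.range coef.length,
      pvG ((List.range coef.length).map (fun i => (List.range coef.length).map
        (fun j => if i == j then (1:Int) else 0))) i j * pvU coef h_ (j+t)
      = pvU coef h_ (i+0+t) := by
  intro i hi t
  have hent : ∀ j ∈ Finset.range coef.length,
      pvG ((List.range coef.length).map (fun i => (List.range coef.length).map
        (fun j => if i == j then (1:Int) else 0))) i j * pvU coef h_ (j+t)
      = if j = i then pvU coef h_ (j+t) else 0 := by
    intro j hj
    unfold pvG
    rw [PySem.List.getD_map_range _ _ _ _ hi,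
        PySem.List.getD_map_range _ _ _ _ (Finset.mem_range.mp hj)]
    by_cases he : i = j
    · rw [if_pos (by simpa using he), if_pos he.symm]
      simp
    · rw [if_neg (by simpa using he), if_neg (fun hc => he hc.symm)]
      simp
  rw [Finset.sum_congr rfl hent, Finset.sum_ite_eq', if_pos (Finset.mem_range.mpr hi)]
  congr 1

lemma pvMat_inv (coef h_ : List Int) (hk : coef.length ≠ 0) :
    ∀ i, i < coef.length → ∀ t, ∑ j ∈ Finset.range coef.length,
      pvG (((List.range (coef.length-1)).map (fun i => (List.range coef.length).map
            (fun j => if j == i+1 then (1:Int) else 0)))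
        ++ [(List.range coef.length).map
            (fun j => (coef.map (fun x => PySem.Int.mod x 2)).getD (coef.length-1-j) 0)]) i j
        * pvU coef h_ (j+t)
      = pvU coef h_ (i+1+t) := by
  intro i hi t
  have hfl : ((List.range (coef.length-1)).map (fun i => (List.range coef.length).map
      (fun j => if j == i+1 then (1:Int) else 0))).length = coef.length-1 := by simp
  by_cases hi1 : i < coef.length-1
  · have hrow : (((List.range (coef.length-1)).map (fun i => (List.range coef.length).map
          (fun j => if j == i+1 then (1:Int) else 0)))
        ++ [(List.range coef.length).map
            (fun j => (coef.map (fun x => PySem.Int.mod x 2)).getD (coef.length-1-j) 0)]).getD i []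
        = (List.range coef.length).map (fun j => if j == i+1 then (1:Int) else 0) := by
      rw [List.getD_eq_getElem?_getD, List.getElem?_append_left (by rw [hfl]; exact hi1)]
      rw [← List.getD_eq_getElem?_getD]
      exact PySem.List.getD_map_range _ _ _ _ hi1
    have hent : ∀ j ∈ Finset.range coef.length,
        pvG (((List.range (coef.length-1)).map (fun i => (List.range coef.length).map
              (fun j => if j == i+1 then (1:Int) else 0)))
          ++ [(List.range coef.length).map
              (fun j => (coef.map (fun x => PySem.Int.mod x 2)).getD (coef.length-1-j) 0)]) i j
          * pvU coef h_ (j+t)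
        = if j = i+1 then pvU coef h_ (j+t) else 0 := by
      intro j hj
      unfold pvG
      rw [hrow, PySem.List.getD_map_range _ _ _ _ (Finset.mem_range.mp hj)]
      by_cases he : j = i+1
      · rw [if_pos (by simpa using he), if_pos he]
        simp
      · rw [if_neg (by simpa using he), if_neg he]
        simp
    rw [Finset.sum_congr rfl hent, Finset.sum_ite_eq',
        if_pos (Finset.mem_range.mpr (by omega : i+1 < coef.length))]
  · have hieq : i = coef.length - 1 := by omega
    have hrow : (((List.range (coef.length-1)).map (fun i => (List.range coef.length).map
          (fun j => if j == i+1 then (1:Int) else 0)))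
        ++ [(List.range coef.length).map
            (fun j => (coef.map (fun x => PySem.Int.mod x 2)).getD (coef.length-1-j) 0)]).getD i []
        = (List.range coef.length).map
            (fun j => (coef.map (fun x => PySem.Int.mod x 2)).getD (coef.length-1-j) 0) := by
      rw [List.getD_eq_getElem?_getD, List.getElem?_append_right (by rw [hfl]; omega)]
      rw [hfl, hieq]
      simp
    have hent : ∀ j ∈ Finset.range coef.length,
        pvG (((List.range (coef.length-1)).map (fun i => (List.range coef.length).map
              (fun j => if j == i+1 then (1:Int) else 0)))
          ++ [(List.range coef.length).map
              (fun j => (coef.map (fun x => PySem.Int.mod x 2)).getD (coef.length-1-j) 0)]) i j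
          * pvU coef h_ (j+t)
        = pvC coef (coef.length-1-j) * pvU coef h_ (j+t) := by
      intro j hj
      unfold pvG
      rw [hrow, PySem.List.getD_map_range _ _ _ _ (Finset.mem_range.mp hj)]
      have hidx : coef.length-1-j < coef.length := by omega
      have hgm : (coef.map (fun x => PySem.Int.mod x 2)).getD (coef.length-1-j) 0
          = PySem.Int.mod (coef.getD (coef.length-1-j) 0) 2 := by
        rw [List.getD_eq_getElem?_getD, List.getElem?_map]
        rw [List.getElem?_eq_getElem hidx]
        simp [List.getD_eq_getElem?_getD, List.getElem?_eq_getElem hidx]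
      rw [hgm]
      unfold pvC
      rw [pvCastMod]
    rw [Finset.sum_congr rfl hent]
    have hrefl := Finset.sum_range_reflect
      (fun j => pvC coef (coef.length-1-j) * pvU coef h_ (j+t)) coef.length
    have hcon : ∀ j ∈ Finset.range coef.length,
        pvC coef (coef.length-1-(coef.length-1-j)) * pvU coef h_ ((coef.length-1-j)+t)
        = pvC coef j * pvU coef h_ (coef.length+t-1-j) := by
      intro j hj
      have hjk := Finset.mem_range.mp hj
      have e1 : coef.length-1-(coef.length-1-j) = j := by omega
      have e2 : (coef.length-1-j)+t = coef.length+t-1-j := by omega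
      rw [e1, e2]
    rw [← hrefl, Finset.sum_congr rfl hcon]
    rw [← pvU_rec coef h_ (coef.length+t) hk (by omega)]
    congr 1
    omega

lemma pvB_main (m : Int) (coef h_ : List Int) (hk : coef.length ≠ 0) (hm : ¬ m < (h_.length : Int)) :
    0 ≤ calculate_term_alt m coef h_ ∧ calculate_term_alt m coef h_ < 2 ∧
    ((calculate_term_alt m coef h_ : Int) : ZMod 2) = pvU coef h_ m.toNat := by
  have hm0 : 0 ≤ m := by
    have : (0:Int) ≤ (h_.length : Int) := by positivity
    omega
  have hbeq : ¬ ((coef.length == 0) = true) := by simpa using hk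
  set Mat := ((List.range (coef.length-1)).map (fun i => (List.range coef.length).map
        (fun j => if j == i+1 then (1:Int) else 0)))
      ++ [(List.range coef.length).map
          (fun j => (coef.map (fun x => PySem.Int.mod x 2)).getD (coef.length-1-j) 0)] with hMatdef
  set Idm := (List.range coef.length).map (fun i => (List.range coef.length).map
      (fun j => if i == j then (1:Int) else 0)) with hIdmdef
  set Seed := (List.range coef.length).map (fun (i : Nat) =>
      if ((i:Int)+1) < (h_.length:Int) then PySem.Int.mod (h_.getD (i+1) 0) 2 else 0) with hSeeddef
  have hB : calculate_term_alt m coef h_ = PySem.Int.mod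
      (((List.range coef.length).map (fun j =>
        ((pvLoopB coef.length Idm Mat m).getD 0 []).getD j 0 * Seed.getD j 0)).sum) 2 := by
    unfold calculate_term_alt
    rw [if_neg hm, if_neg hbeq]
  rw [hB]
  refine ⟨PySem.Int.mod_nonneg _ (by norm_num), PySem.Int.mod_lt _ (by norm_num), ?_⟩
  rw [pvCastMod, Int.cast_list_sum, List.map_map]
  have hterm : ∀ j ∈ List.range coef.length,
      ((fun (z : Int) => (z : ZMod 2)) ∘ (fun j =>
        ((pvLoopB coef.length Idm Mat m).getD 0 []).getD j 0 * Seed.getD j 0)) j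
      = pvG (pvLoopB coef.length Idm Mat m) 0 j * pvU coef h_ (j+0) := by
    intro j hj
    have hjk := List.mem_range.mp hj
    simp only [Function.comp]
    push_cast
    have hseed : ((Seed.getD j 0 : Int) : ZMod 2) = pvU coef h_ (j+0) := by
      rw [hSeeddef, PySem.List.getD_map_range _ _ _ _ hjk]
      rw [pvU_seed coef h_ (j+0) hk (by omega)]
      have hcond : (((j:Int)+1) < (h_.length:Int)) ↔ (j+1 < h_.length) := by omega
      by_cases hc : j+1 < h_.length
      · rw [if_pos (hcond.mpr hc)]
        have e : j+0+1 = j+1 := by omega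
        rw [e, if_pos hc, pvCastMod]
      · rw [if_neg (fun hx => hc (hcond.mp hx))]
        have e : j+0+1 = j+1 := by omega
        rw [e, if_neg hc]
        simp
    rw [hseed]
    rfl
  rw [List.map_congr_left hterm]
  have hfin : ((List.range coef.length).map (fun j =>
      pvG (pvLoopB coef.length Idm Mat m) 0 j * pvU coef h_ (j+0))).sum
      = ∑ j ∈ Finset.range coef.length, pvG (pvLoopB coef.length Idm Mat m) 0 j * pvU coef h_ (j+0) := rfl
  rw [hfin]
  have hloop := pvLoopB_class coef h_ m.toNat m rfl hm0 Idm Mat 0 1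
    (by rw [hIdmdef]; exact pvIdm_inv coef h_)
    (by rw [hMatdef]; exact pvMat_inv coef h_ hk)
    0 (by omega) 0
  rw [hloop]
  congr 1
  omega

-- ===== VERDICT (by name: the statement is the Claim_ definition above) =====
theorem calculate_term_spec : Claim_equal_calculate_term := by
  intro m coef h_ _ _
  unfold Spec_calculate_term
  by_cases hml : m < (h_.length : Int)
  · unfold calculate_term calculate_term_alt
    rw [if_pos hml, if_pos hml]
  · by_cases hk : coef.length = 0
    · have hbeq : (coef.length == 0) = true := by simpa using hk
      unfold calculate_term calculate_term_alt
      rw [if_neg hml, if_neg hml, if_pos hbeq, if_pos hbeq]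
    · obtain ⟨a0, a1, a2⟩ := pvA_main m coef h_ hk hml
      obtain ⟨b0, b1, b2⟩ := pvB_main m coef h_ hk hml
      have hcast : ((calculate_term m coef h_ : Int) : ZMod 2)
          = ((calculate_term_alt m coef h_ : Int) : ZMod 2) := by rw [a2, b2]
      have hA01 : calculate_term m coef h_ = 0 ∨ calculate_term m coef h_ = 1 := by omega
      have hB01 : calculate_term_alt m coef h_ = 0 ∨ calculate_term_alt m coef h_ = 1 := by omega
      rcases hA01 with h | h <;> rcases hB01 with h' | h' <;> rw [h, h'] at hcast ⊢ <;>
        first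
        | rfl
        | (exfalso; revert hcast; decide)
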